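-- pv_equiv track=rewrite | github.com/ReggX/AutoDigipick | autodigipick/__init__.py | try_digipick
-- ===== SOURCE A (Python) =====
-- def try_digipick(
--   lock: tuple[int, ...],
--   digipick: tuple[int, ...]
-- ) -> list[tuple[int, tuple[int, ...]]]:
--   assert len(lock) == len(digipick)
--   if all(
--     digipick[i] == 0
--     for i in range(len(digipick))
--   ):
--     return []
--   results = []
--   # rotate pick
--   for i in range(len(digipick)):
--     rotated_pick = digipick[i:] + digipick[:i]
--     combined_lock = tuple(
--       lock[j] + rotated_pick[j]
--       for j in range(len(lock))
--     )
--     if all(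
--       combined_lock[j] <= 1
--       for j in range(len(lock))
--     ):
--       results += [(i, combined_lock)]
--   return results
-- ===== SOURCE B (Python) =====
-- def try_digipick(
--   lock: tuple[int, ...],
--   digipick: tuple[int, ...]
-- ) -> list[tuple[int, tuple[int, ...]]]:
--   assert len(lock) == len(digipick)
--   n = len(lock)
--   if not any(digipick):
--     return []
--   # Mark bad shifts: shift i collides iff some pick pin p lands on a lock
--   # position j with digipick[p] + lock[j] > 1, i.e. i == (p - j) % n.
--   bad = [False] * n
--   for p in range(n):
--     for j in range(n):
--       if digipick[p] + lock[j] > 1: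
--         bad[(p - j) % n] = True
--   # Build combined locks only for the surviving shifts.
--   results = []
--   for i in range(n):
--     if not bad[i]:
--       results.append(
--         (i, tuple(lock[j] + digipick[(i + j) % n] for j in range(n)))
--       )
--   return results
-- ===== Notes on version B (the rewrite author's own statement) =====
-- stated objective: alternative
-- what changed: Instead of building and checking every rotation, B marks the set of colliding shifts directly from the violating (pick pin, lock position) pairs and builds combined locks only for the surviving shifts, so the per-rotation all() scan disappears.
import Mathlib
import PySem

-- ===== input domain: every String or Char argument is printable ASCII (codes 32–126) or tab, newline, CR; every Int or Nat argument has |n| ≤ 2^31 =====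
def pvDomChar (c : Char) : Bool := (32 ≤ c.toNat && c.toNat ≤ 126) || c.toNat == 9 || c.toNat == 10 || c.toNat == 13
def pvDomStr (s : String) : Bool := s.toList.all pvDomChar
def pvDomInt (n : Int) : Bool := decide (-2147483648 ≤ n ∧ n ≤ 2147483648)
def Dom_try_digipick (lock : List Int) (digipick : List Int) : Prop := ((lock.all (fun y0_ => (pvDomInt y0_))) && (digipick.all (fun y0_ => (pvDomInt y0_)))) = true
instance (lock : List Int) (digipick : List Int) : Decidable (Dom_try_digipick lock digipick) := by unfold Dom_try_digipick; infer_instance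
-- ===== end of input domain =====

-- B marks the colliding shifts directly from the violating (pick pin, lock position) pairs
-- and builds combined locks only for the surviving shifts (alternative algorithm, same cost class).

-- ===== PORT A =====
def try_digipick (lock : List Int) (digipick : List Int) : List (Int × List Int) :=
  if (PySem.List.pyRange 0 (PySem.List.len digipick) 1).all
       (fun i => PySem.List.pyGetD digipick i 0 == 0) then
    []
  else
    (PySem.List.pyRange 0 (PySem.List.len digipick) 1).foldl
      (fun results i =>
        let rotated_pick :=
          PySem.List.slice digipick (some i) none ++ PySem.List.slice digipick none (some i)
        let combined_lock :=
          (PySem.List.pyRange 0 (PySem.List.len lock) 1).map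
            (fun j => PySem.List.pyGetD lock j 0 + PySem.List.pyGetD rotated_pick j 0)
        if (PySem.List.pyRange 0 (PySem.List.len lock) 1).all
             (fun j => decide (PySem.List.pyGetD combined_lock j 0 ≤ 1)) then
          results ++ [(i, combined_lock)]
        else results)
      []

-- ===== PORT B =====
def try_digipick_alt (lock : List Int) (digipick : List Int) : List (Int × List Int) :=
  let n : Int := PySem.List.len lock
  if digipick.any (fun x => !(x == 0)) then
    let bad : List Bool :=
      (PySem.List.pyRange 0 n 1).foldl
        (fun bad p =>
          (PySem.List.pyRange 0 n 1).foldl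
            (fun bad j =>
              if PySem.List.pyGetD digipick p 0 + PySem.List.pyGetD lock j 0 > 1 then
                PySem.List.pySetD bad (PySem.Int.mod (p - j) n) true
              else bad)
            bad)
        (List.replicate n.toNat false)
    (PySem.List.pyRange 0 n 1).foldl
      (fun results i =>
        if !(PySem.List.pyGetD bad i false) then
          results ++
            [(i,
              (PySem.List.pyRange 0 n 1).map
                (fun j =>
                  PySem.List.pyGetD lock j 0 +
                    PySem.List.pyGetD digipick (PySem.Int.mod (i + j) n) 0))]
        else results)
      []
  else []

-- ===== PRECONDITION & SPEC =====
-- Pre_ excludes exactly the inputs where A's assert fails (AssertionError): unequal lengths.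
def Pre_try_digipick (lock : List Int) (digipick : List Int) : Prop :=
  lock.length = digipick.length
instance (lock : List Int) (digipick : List Int) : Decidable (Pre_try_digipick lock digipick) := by
  unfold Pre_try_digipick; infer_instance
def pvWitness_try_digipick : List Int × List Int := ([0, 1], [1, 0])
def Spec_try_digipick (lock : List Int) (digipick : List Int) (out : List (Int × List Int)) : Prop := out = try_digipick_alt lock digipick
instance (lock : List Int) (digipick : List Int) (out : List (Int × List Int)) : Decidable (Spec_try_digipick lock digipick out) := by unfold Spec_try_digipick; infer_instance

-- ===== CLAIM (what is proved, stated in full; the proofs are below) =====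
def Claim_equal_try_digipick : Prop := ∀ (lock : List Int) (digipick : List Int), Dom_try_digipick lock digipick → Pre_try_digipick lock digipick → Spec_try_digipick lock digipick (try_digipick lock digipick)

-- ===== LEMMAS AND PROOFS =====

-- common reference form of the result
def pvComb (lock digipick : List Int) (i : Nat) : List Int :=
  (List.range lock.length).map
    (fun j => lock.getD j 0 + digipick.getD ((i + j) % lock.length) 0)

def pvOk (lock digipick : List Int) (i : Nat) : Bool :=
  (List.range lock.length).all
    (fun j => decide (lock.getD j 0 + digipick.getD ((i + j) % lock.length) 0 ≤ 1))

def pvSpecList (lock digipick : List Int) : List (Int × List Int) :=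
  ((List.range lock.length).filter (pvOk lock digipick)).map
    (fun (i : Nat) => ((i : Int), pvComb lock digipick i))

-- Nat-mod characterisation
lemma pv_mod_char (n i j : Nat) (hi : i < n) (hj : j < n) :
    (i + j) % n = if i + j < n then i + j else i + j - n := by
  split_ifs with h
  · exact Nat.mod_eq_of_lt h
  · rw [Nat.mod_eq_sub_mod (by omega), Nat.mod_eq_of_lt (by omega)]

lemma pv_emod_char (n p j : Nat) (hn : 0 < n) (hp : p < n) (hj : j < n) :
    (((p : Int) - j) % (n : Int)).toNat = if j ≤ p then p - j else p + n - j := by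
  have hn' : (0 : Int) < n := by exact_mod_cast hn
  split_ifs with h
  · have : ((p : Int) - j) % (n : Int) = (p : Int) - j := by
      apply Int.emod_eq_of_lt <;> omega
    omega
  · have h1 : ((p : Int) - j) % (n : Int) = ((p : Int) - j + n * 1) % (n : Int) :=
      (Int.add_mul_emod_self_left ((p:Int)-j) n 1).symm
    have h2 : ((p : Int) - j + n * 1) % (n : Int) = (p : Int) - j + n * 1 := by
      apply Int.emod_eq_of_lt <;> omega
    omega

lemma pv_shift_iff (n i p j : Nat) (hn : 0 < n) (hi : i < n) (hp : p < n) (hj : j < n) :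
    (((p : Int) - j) % (n : Int)).toNat = i ↔ p = (i + j) % n := by
  rw [pv_emod_char n p j hn hp hj, pv_mod_char n i j hi hj]
  split_ifs <;> omega

-- rotation indexing
lemma pv_rot_getD (digipick : List Int) (i j : Nat) (hi : i < digipick.length)
    (hj : j < digipick.length) :
    (digipick.drop i ++ digipick.take i).getD j 0
      = digipick.getD ((i + j) % digipick.length) 0 := by
  have hn : 0 < digipick.length := by omega
  rcases Nat.lt_or_ge (i + j) digipick.length with hlt | hge
  · rw [Nat.mod_eq_of_lt hlt,
        List.getD_append _ _ _ _ (by simp; omega),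
        List.getD_eq_getElem _ _ (by simp; omega),
        List.getD_eq_getElem _ _ hlt,
        List.getElem_drop]
  · have hij : i + j - digipick.length < digipick.length := by omega
    rw [Nat.mod_eq_sub_mod hge, Nat.mod_eq_of_lt hij,
        List.getD_append_right _ _ _ _ (by simp; omega),
        show j - (List.drop i digipick).length = i + j - digipick.length from by
          simp; omega,
        List.getD_eq_getElem _ _ (by simp [List.length_take]; omega),
        List.getD_eq_getElem _ _ hij,
        List.getElem_take]

-- bad-array characterisation
lemma pv_foldl_set_getD {α : Type} (l : List α) (c : α → Bool) (idx : α → Nat)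
    (b : List Bool) (i : Nat)
    (hidx : ∀ x ∈ l, idx x < b.length) (hi : i < b.length) :
    (l.foldl (fun b x => if c x then b.set (idx x) true else b) b).getD i false
      = (b.getD i false || l.any (fun x => c x && (idx x == i))) := by
  induction l generalizing b with
  | nil => simp
  | cons x xs ih =>
    have hx : idx x < b.length := hidx x (by simp)
    simp only [List.foldl_cons, List.any_cons]
    by_cases hc : c x
    · rw [if_pos hc]
      rw [ih (b.set (idx x) true)
            (fun y hy => by simpa using hidx y (List.mem_cons_of_mem _ hy))
            (by simpa using hi)]
      by_cases hq : idx x = i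
      · subst hq
        rw [List.getD_eq_getElem _ _ (by simpa using hx),
            List.getElem_set, if_pos rfl]
        simp [hc]
      · have : (b.set (idx x) true).getD i false = b.getD i false := by
          rw [List.getD_eq_getElem _ _ (by simpa using hi),
              List.getElem_set, if_neg hq, List.getD_eq_getElem _ _ hi]
        rw [this]
        have hb : (idx x == i) = false := beq_eq_false_iff_ne.mpr hq
        simp [hc, hb]
    · rw [if_neg hc]
      rw [ih b (fun y hy => hidx y (List.mem_cons_of_mem _ hy)) hi]
      simp [hc]

-- the all-zero tests agree
lemma pv_zero_eq (digipick : List Int) :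
    ((List.range digipick.length).all (fun i => digipick.getD i 0 == 0))
      = !(digipick.any (fun x => !(x == 0))) := by
  rw [Bool.eq_iff_iff]
  constructor
  · intro h
    simp only [List.all_eq_true, List.mem_range] at h
    simp only [Bool.not_eq_true']
    rw [List.any_eq_false]
    intro x hx
    obtain ⟨k, hk, rfl⟩ := List.mem_iff_getElem.mp hx
    have := h k hk
    rw [List.getD_eq_getElem _ _ hk] at this
    simpa using this
  · intro h
    simp only [Bool.not_eq_true'] at h
    rw [List.any_eq_false] at h
    simp only [List.all_eq_true, List.mem_range]
    intro k hk
    rw [List.getD_eq_getElem _ _ hk]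
    simpa using h _ (List.getElem_mem hk)

-- congruence helpers
lemma pv_all_congr {α : Type} (l : List α) (f g : α → Bool)
    (h : ∀ x ∈ l, f x = g x) : l.all f = l.all g := by
  induction l with
  | nil => rfl
  | cons x xs ih =>
    simp only [List.all_cons, h x (List.mem_cons_self), ih (fun y hy => h y (List.mem_cons_of_mem _ hy))]

lemma pv_mod_emod {m : Int} (hm : 0 < m) (a : Int) : PySem.Int.mod a m = a % m :=
  PySem.Int.mod_eq_emod_of_pos hm

lemma pv_pySetD_emod {m : Int} (hm : 0 < m) (b : List Bool) (a : Int) (v : Bool) :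
    PySem.List.pySetD b (a % m) v = b.set ((a % m).toNat) v :=
  PySem.List.pySetD_of_nonneg _ _ (Int.emod_nonneg _ (by omega))

lemma pv_foldl_set_length {α : Type} (l : List α) (c : α → Bool) (idx : α → Nat)
    (b : List Bool) :
    (l.foldl (fun b x => if c x then b.set (idx x) true else b) b).length = b.length := by
  induction l generalizing b with
  | nil => rfl
  | cons x xs ih =>
    simp only [List.foldl_cons]
    by_cases hc : c x
    · rw [if_pos hc, ih, List.length_set]
    · rw [if_neg hc, ih]

lemma pv_foldl_set2_getD {α β : Type} (lo : List α) (li : List β)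
    (c : α → β → Bool) (idx : α → β → Nat) (b : List Bool) (i : Nat)
    (hidx : ∀ x y, idx x y < b.length) (hi : i < b.length) :
    (lo.foldl (fun b x => li.foldl (fun b y => if c x y then b.set (idx x y) true else b) b) b).getD i false
      = (b.getD i false || lo.any (fun x => li.any (fun y => c x y && (idx x y == i)))) := by
  induction lo generalizing b with
  | nil => simp
  | cons x xs ih =>
    simp only [List.foldl_cons, List.any_cons]
    have hlen : (li.foldl (fun b y => if c x y then b.set (idx x y) true else b) b).length = b.length :=
      pv_foldl_set_length li (c x) (idx x) b
    rw [ih _ (fun x' y => by rw [hlen]; exact hidx x' y) (by rw [hlen]; exact hi)]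
    rw [pv_foldl_set_getD li (c x) (idx x) b i (fun y _ => hidx x y) hi]
    simp [Bool.or_assoc]

-- characterisation of B's bad array
lemma pv_bad_getD (lk dg : List Int) (n : Nat) (hn0 : 0 < n) (i : Nat) (hi : i < n) :
    ((List.range n).foldl
       (fun b p => (List.range n).foldl
          (fun b j =>
            if 1 < dg.getD p 0 + lk.getD j 0
            then b.set ((((p : Int) - (j : Int)) % (n : Int)).toNat) true
            else b) b)
       (List.replicate n false)).getD i false
    = !((List.range n).all (fun j => decide (lk.getD j 0 + dg.getD ((i + j) % n) 0 ≤ 1))) := by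
  have hne : ((n : Int)) ≠ 0 := Int.natCast_ne_zero.mpr hn0.ne'
  have hpos : (0 : Int) < (n : Int) := by exact_mod_cast hn0
  have h2 := pv_foldl_set2_getD (List.range n) (List.range n)
      (fun p j => decide (1 < dg.getD p 0 + lk.getD j 0))
      (fun p j => (((p : Int) - (j : Int)) % (n : Int)).toNat)
      (List.replicate n false) i
      (fun p j => by
        have h1 := Int.emod_nonneg ((p : Int) - (j : Int)) hne
        have h2 := Int.emod_lt_of_pos ((p : Int) - (j : Int)) hpos
        simp only [List.length_replicate]
        omega)
      (by simpa using hi)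
  simp only [decide_eq_true_eq] at h2
  rw [h2]
  rw [List.getD_eq_getElem _ _ (by simpa using hi)]
  simp only [List.getElem_replicate, Bool.false_or]
  rw [Bool.eq_iff_iff]
  simp only [List.any_eq_true, List.mem_range, Bool.and_eq_true, decide_eq_true_eq, beq_iff_eq,
    Bool.not_eq_true', List.all_eq_false]
  constructor
  · rintro ⟨p, hp, j, hj, hcoll, hidx⟩
    refine ⟨j, hj, ?_⟩
    have hpe : p = (i + j) % n := (pv_shift_iff n i p j hn0 hi hp hj).mp hidx
    rw [hpe] at hcoll
    omega
  · rintro ⟨j, hj, hgt⟩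
    exact ⟨(i + j) % n, Nat.mod_lt _ hn0, j, hj, by omega,
      (pv_shift_iff n i _ j hn0 hi (Nat.mod_lt _ hn0) hj).mpr rfl⟩

-- A equals the reference form
lemma pv_A_eq (lock digipick : List Int) (h : lock.length = digipick.length)
    (hz : digipick.any (fun x => !(x == 0)) = true) :
    try_digipick lock digipick = pvSpecList lock digipick := by
  unfold try_digipick
  simp only [PySem.List.len_eq, PySem.List.pyRange_one, sub_zero, Int.toNat_natCast,
    zero_add, List.all_map, List.foldl_map, List.map_map, Function.comp_def,
    PySem.List.pyGetD_natCast, PySem.List.slice_from_natCast, PySem.List.slice_to_natCast]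
  rw [pv_zero_eq, hz]
  simp only [Bool.not_true, Bool.false_eq_true, if_false]
  refine (PySem.List.foldl_congr_mem _ _
      (fun (results : List (Int × List Int)) (i : Nat) =>
        if pvOk lock digipick i then results ++ [((i : Int), pvComb lock digipick i)] else results)
      [] ?_).trans ?_
  · intro acc i hi
    have hilt : i < digipick.length := List.mem_range.mp hi
    have hval : List.map
        (fun j => lock.getD j 0 + (List.drop i digipick ++ List.take i digipick).getD j 0)
        (List.range lock.length) = pvComb lock digipick i := by
      unfold pvComb
      refine List.map_congr_left (fun j hj => ?_)
      rw [pv_rot_getD digipick i j hilt (h ▸ List.mem_range.mp hj), h]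
    rw [hval]
    have hcond : ((List.range lock.length).all
          (fun j => decide ((pvComb lock digipick i).getD j 0 ≤ 1))) = pvOk lock digipick i := by
      unfold pvOk
      refine pv_all_congr _ _ _ (fun j hj => ?_)
      unfold pvComb
      rw [PySem.List.getD_map_range _ _ _ _ (List.mem_range.mp hj)]
    rw [hcond]
  · rw [PySem.List.foldl_append_if]
    unfold pvSpecList
    rw [h]
    simp

-- B equals the reference form
lemma pv_B_eq (lock digipick : List Int) (h : lock.length = digipick.length)
    (hz : digipick.any (fun x => !(x == 0)) = true) :
    try_digipick_alt lock digipick = pvSpecList lock digipick := by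
  have hd0 : 0 < digipick.length := by
    cases digipick with
    | nil => simp at hz
    | cons a t => simp
  have hn0 : 0 < lock.length := by omega
  have hn' : (0 : Int) < (lock.length : Int) := by exact_mod_cast hn0
  unfold try_digipick_alt
  simp only [PySem.List.len_eq]
  rw [if_pos hz]
  simp only [PySem.List.pyRange_one, sub_zero, Int.toNat_natCast, zero_add,
    List.foldl_map, List.map_map, Function.comp_def, PySem.List.pyGetD_natCast,
    pv_mod_emod hn', pv_pySetD_emod hn']
  refine (PySem.List.foldl_congr_mem _ _
      (fun (results : List (Int × List Int)) (i : Nat) =>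
        if pvOk lock digipick i then results ++ [((i : Int), pvComb lock digipick i)] else results)
      [] ?_).trans ?_
  · intro acc i hi
    have hilt : i < lock.length := List.mem_range.mp hi
    have hval : List.map
        (fun j => lock.getD j 0 +
          PySem.List.pyGetD digipick (((i : Int) + (j : Int)) % (lock.length : Int)) 0)
        (List.range lock.length) = pvComb lock digipick i := by
      unfold pvComb
      refine List.map_congr_left (fun j hj => ?_)
      rw [show ((i : Int) + (j : Int)) = (((i + j : Nat)) : Int) by push_cast; ring,
          ← Int.natCast_mod, PySem.List.pyGetD_natCast]
    rw [hval]
    rw [pv_bad_getD lock digipick lock.length hn0 i hilt]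
    simp only [Bool.not_not]
    rfl
  · rw [PySem.List.foldl_append_if]
    unfold pvSpecList
    simp

-- ===== VERDICT (by name: the statement is the Claim_ definition above) =====
theorem try_digipick_spec : Claim_equal_try_digipick := by
  intro lock digipick _ hpre
  unfold Spec_try_digipick
  by_cases hz : digipick.any (fun x => !(x == 0)) = true
  · rw [pv_A_eq lock digipick hpre hz, pv_B_eq lock digipick hpre hz]
  · have hz' : digipick.any (fun x => !(x == 0)) = false := by
      revert hz; cases digipick.any (fun x => !(x == 0)) <;> simp
    unfold try_digipick try_digipick_alt
    simp only [PySem.List.len_eq, PySem.List.pyRange_one, sub_zero, Int.toNat_natCast,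
      zero_add, List.all_map, Function.comp_def, PySem.List.pyGetD_natCast]
    rw [pv_zero_eq, hz']
    simp
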